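-- pv_equiv track=rewrite | github.com/s4003743/Wordle-Solver | util.py | validate_feedback
-- ===== SOURCE A (Python) =====
-- def validate_feedback(feedback : str) -> bool:
--     """
--     Takes a string of 5 letters and ensures it can be converted into the feedback list.
--     """
--
--     valid_char = ['y','b','g']
--     length = len(feedback) == 5
--     chars = True
--
--     for char in feedback:
--         if char not in valid_char:
--             chars = False
--             break
--
--     return length and chars
-- ===== SOURCE B (Python) =====
-- import re
--
-- _FEEDBACK_PAT = re.compile(r'[ybg]{5}')
--
--
-- def validate_feedback(feedback: str) -> bool:
--     """
--     Takes a string of 5 letters and ensures it can be converted into the feedback list.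
--     """
--     return _FEEDBACK_PAT.fullmatch(feedback) is not None
-- ===== Notes on version B (the rewrite author's own statement) =====
-- stated objective: idiomatic
-- what changed: Replaces the explicit length check plus char-by-char membership loop with a flag and break by a single precompiled regular-expression fullmatch of [ybg]{5}, which enforces the alphabet and the length in one anchored pattern match (ported to Lean as the equivalent 5-state DFA).
import Mathlib
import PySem

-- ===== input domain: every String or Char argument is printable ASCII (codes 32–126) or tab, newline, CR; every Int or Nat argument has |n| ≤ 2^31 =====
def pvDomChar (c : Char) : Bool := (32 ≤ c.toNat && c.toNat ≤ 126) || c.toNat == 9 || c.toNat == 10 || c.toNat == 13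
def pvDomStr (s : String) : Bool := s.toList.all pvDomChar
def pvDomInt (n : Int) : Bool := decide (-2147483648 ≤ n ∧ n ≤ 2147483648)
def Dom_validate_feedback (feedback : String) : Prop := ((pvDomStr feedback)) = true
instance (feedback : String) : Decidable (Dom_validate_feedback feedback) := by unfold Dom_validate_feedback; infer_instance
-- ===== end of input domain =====

-- B replaces A's length check + membership loop with one anchored regex fullmatch of [ybg]{5},
-- ported here as the equivalent 5-state character-class DFA (same cost, more idiomatic Python).

-- ===== PORT A =====
-- A's for-loop with break: chars flag becomes false on the first char not in valid_char
def vfLoopA (valid_char : List Char) : List Char → Bool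
  | [] => true
  | c :: rest => if !(valid_char.contains c) then false else vfLoopA valid_char rest

def validate_feedback (feedback : String) : Bool :=
  let valid_char : List Char := ['y', 'b', 'g']
  let length : Bool := feedback.toList.length == 5
  let chars : Bool := vfLoopA valid_char feedback.toList
  length && chars

-- ===== PORT B =====
-- the DFA of the regex [ybg]{5}: state = number of class characters matched so far (none = dead state);
-- fullmatch succeeds iff the whole input drives state 0 to the accepting state 5
def vfInClass (c : Char) : Bool := c == 'y' || c == 'b' || c == 'g'

def vfDFAstep (st : Option Nat) (c : Char) : Option Nat :=
  match st with
  | none => none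
  | some k => if vfInClass c && decide (k < 5) then some (k + 1) else none

def validate_feedback_alt (feedback : String) : Bool :=
  feedback.toList.foldl vfDFAstep (some 0) == some 5

-- ===== PRECONDITION & SPEC =====
def Spec_validate_feedback (feedback : String) (out : Bool) : Prop := out = validate_feedback_alt feedback
instance (feedback : String) (out : Bool) : Decidable (Spec_validate_feedback feedback out) := by unfold Spec_validate_feedback; infer_instance

-- ===== CLAIM (what is proved, stated in full; the proofs are below) =====
def Claim_equal_validate_feedback : Prop := ∀ (feedback : String), Dom_validate_feedback feedback → Spec_validate_feedback feedback (validate_feedback feedback)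

-- ===== LEMMAS AND PROOFS =====

lemma contains_eq_inClass (c : Char) : (['y','b','g'] : List Char).contains c = vfInClass c := by
  simp only [List.contains_cons, List.contains_nil, Bool.or_false, vfInClass]
  cases hy : c == 'y' <;> cases hb : c == 'b' <;> cases hg : c == 'g' <;>
    simp_all [beq_iff_eq]

lemma vfLoopA_eq_all (l : List Char) :
    vfLoopA ['y','b','g'] l = l.all vfInClass := by
  induction l with
  | nil => rfl
  | cons c rest ih =>
    simp only [vfLoopA, List.all_cons, contains_eq_inClass]
    by_cases h : vfInClass c = true <;> simp [h, ih]

lemma vfDFA_dead (l : List Char) : l.foldl vfDFAstep none = none := by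
  induction l with
  | nil => rfl
  | cons c rest ih => simpa [List.foldl, vfDFAstep] using ih

-- characterisation of the DFA run from a live state
lemma vfDFA_run (l : List Char) : ∀ (k : Nat), k ≤ 5 →
    l.foldl vfDFAstep (some k)
      = if l.all vfInClass && decide (k + l.length ≤ 5)
        then some (k + l.length) else none := by
  induction l with
  | nil => intro k hk; simp [hk]
  | cons c rest ih =>
    intro k hk5
    simp only [List.foldl, vfDFAstep, List.all_cons, List.length_cons]
    by_cases hc : vfInClass c = true
    · by_cases hk : k < 5
      · rw [if_pos (by simp [hc, hk]), ih (k + 1) (by omega)]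
        by_cases hr : rest.all vfInClass = true
        · by_cases hlen : k + 1 + rest.length ≤ 5
          · rw [if_pos (by simp [hr, hlen]), if_pos (by simp [hc, hr]; omega)]
            congr 1; omega
          · rw [if_neg (by simp [hr]; omega), if_neg (by simp [hr]; omega)]
        · rw [if_neg (by simp [hr]), if_neg (by simp [hr])]
      · rw [if_neg (by simp [hk]), vfDFA_dead, if_neg (by simp; omega)]
    · rw [if_neg (by simp [hc]), vfDFA_dead, if_neg (by simp [hc])]

-- ===== VERDICT (by name: the statement is the Claim_ definition above) =====
theorem validate_feedback_spec : Claim_equal_validate_feedback := by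
  intro feedback _
  unfold Spec_validate_feedback validate_feedback validate_feedback_alt
  show (feedback.toList.length == 5 && vfLoopA ['y','b','g'] feedback.toList)
      = (feedback.toList.foldl vfDFAstep (some 0) == some 5)
  rw [vfLoopA_eq_all, vfDFA_run feedback.toList 0 (by omega)]
  generalize feedback.toList = L
  by_cases hall : L.all vfInClass = true
  · by_cases hlen : L.length = 5
    · simp [hall, hlen]
    · by_cases h5 : L.length ≤ 5
      · rw [if_pos (by simp [hall]; omega)]
        simp [hall]
      · rw [if_neg (by simp; omega)]
        have h : (L.length == 5) = false := by simp [hlen]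
        simp [h]
  · rw [if_neg (by simp [hall])]
    simp [hall]
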